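-- pv_equiv track=rewrite | github.com/hgfgdsy/python_analysis | semver.py | parse_build
-- ===== SOURCE A (Python) =====
-- def is_ident_char(c):
--     return  'A' <= c <= 'Z' or 'a' <= c <= 'z' or '0' <= c <= '9' or c == '-'
--
-- def parse_build(v):
--     if v == "" or v[0] != '+':
--         return "", "", False
--
--     i = 1
--     start = 1
--
--     while i < len(v):
--         if (not is_ident_char(v[i])) and v[i] != '.':
--             return "", "", False
--
--         if v[i] == '.':
--             if start == i:
--                 return "", "", False
--
--             start = i + 1
--         i = i + 1
--
--     if start == i:
--         return "", "", False
--
--     return v[:i], v[i:], True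
-- ===== SOURCE B (Python) =====
-- def is_ident_char(c):
--     return  'A' <= c <= 'Z' or 'a' <= c <= 'z' or '0' <= c <= '9' or c == '-'
--
-- def parse_build(v):
--     if v == "" or v[0] != '+':
--         return "", "", False
--     if all(p != "" and all(is_ident_char(c) for c in p) for p in v[1:].split('.')):
--         return v, "", True
--     return "", "", False
-- ===== Notes on version B (the rewrite author's own statement) =====
-- stated objective: simpler
-- what changed: Replaces A's single-pass index/start tracking loop with splitting the suffix after the plus sign at dot separators and validating each segment (nonempty, all identifier chars) in one all(...) check.
import Mathlib
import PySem

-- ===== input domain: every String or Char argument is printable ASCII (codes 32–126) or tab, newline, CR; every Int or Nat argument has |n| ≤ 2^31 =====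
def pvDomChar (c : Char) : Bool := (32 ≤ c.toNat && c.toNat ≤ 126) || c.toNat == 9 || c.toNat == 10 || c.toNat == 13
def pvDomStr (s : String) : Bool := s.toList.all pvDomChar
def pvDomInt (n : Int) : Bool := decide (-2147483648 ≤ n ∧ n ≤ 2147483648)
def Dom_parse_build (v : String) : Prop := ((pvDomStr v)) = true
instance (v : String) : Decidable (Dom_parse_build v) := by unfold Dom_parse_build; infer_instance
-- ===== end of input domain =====

-- B replaces A's single-pass index/start tracking with split-at-dot-separators plus per-segment
-- validation (objective: simpler). Equivalence of return values is proved on all inputs.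

-- ===== PORT A =====
-- shared module helper is_ident_char (Python's chained 'A' <= c <= 'Z' … on chars)
def is_ident_char (c : Char) : Bool :=
  ('A' ≤ c && c ≤ 'Z') || ('a' ≤ c && c ≤ 'z') || ('0' ≤ c && c ≤ '9') || c == '-'

-- A's while loop, step for step: i, start as in the Python; cs[i] is safe under i < len
def parse_buildLoop (cs : List Char) (i start : Nat) : String × String × Bool :=
  if h : i < cs.length then
    if ¬ is_ident_char cs[i] ∧ cs[i] ≠ '.' then ("", "", false)
    else if cs[i] = '.' then
      if start = i then ("", "", false)
      else parse_buildLoop cs (i+1) (i+1)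
    else parse_buildLoop cs (i+1) start
  else
    if start = i then ("", "", false)
    else (String.ofList (PySem.List.slice cs none (some (i : Int))),   -- v[:i]
          String.ofList (PySem.List.slice cs (some (i : Int)) none), true)  -- v[i:]
termination_by cs.length - i
decreasing_by all_goals omega

def parse_build (v : String) : String × String × Bool :=
  if v = "" ∨ PySem.Str.pyGet? v 0 ≠ some '+' then ("", "", false)
  else parse_buildLoop v.toList 1 1

-- ===== PORT B =====
def parse_build_alt (v : String) : String × String × Bool :=
  if v = "" ∨ PySem.Str.pyGet? v 0 ≠ some '+' then ("", "", false)
  else if (PySem.Chars.splitOn (PySem.List.slice v.toList (some 1) none) ['.']).all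
            (fun p => decide (p ≠ []) && p.all is_ident_char)
       then (v, "", true)
       else ("", "", false)

-- ===== PRECONDITION & SPEC =====
def Spec_parse_build (v : String) (out : String × String × Bool) : Prop := out = parse_build_alt v
instance (v : String) (out : String × String × Bool) : Decidable (Spec_parse_build v out) := by unfold Spec_parse_build; infer_instance

-- ===== CLAIM (what is proved, stated in full; the proofs are below) =====
def Claim_equal_parse_build : Prop := ∀ (v : String), Dom_parse_build v → Spec_parse_build v (parse_build v)

-- ===== LEMMAS AND PROOFS =====

-- proof-side model of a split at a single-char separator
def pvModHead (c : Char) : List (List Char) → List (List Char)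
  | [] => [[c]]
  | p :: ps => (c :: p) :: ps

def pvSp : List Char → List (List Char)
  | [] => [[]]
  | c :: t => if c = '.' then [] :: pvSp t else pvModHead c (pvSp t)

lemma pvSp_ne_nil (l : List Char) : pvSp l ≠ [] := by
  cases l with
  | nil => simp [pvSp]
  | cons c t =>
    simp only [pvSp]
    split
    · simp
    · cases pvSp t <;> simp [pvModHead]

lemma pvGo_eq : ∀ (fuel : Nat) (l cur : List Char) (acc : List (List Char)), l.length < fuel →
    PySem.Chars.splitOn.go ['.'] fuel l cur acc =
      acc.reverse ++ (match pvSp l with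
        | p :: ps => (cur.reverse ++ p) :: ps
        | [] => []) := by
  intro fuel
  induction fuel with
  | zero => intro l cur acc h; omega
  | succ f ih =>
    intro l cur acc h
    cases l with
    | nil => simp [PySem.Chars.splitOn.go, pvSp]
    | cons c rest =>
      by_cases hc : c = '.'
      · subst hc
        have : PySem.Chars.splitOn.go ['.'] (f+1) ('.' :: rest) cur acc =
            PySem.Chars.splitOn.go ['.'] f rest [] (cur.reverse :: acc) := by
          simp [PySem.Chars.splitOn.go, List.isPrefixOf]
        rw [this, ih rest [] (cur.reverse :: acc) (by simpa using Nat.lt_of_succ_lt_succ h)]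
        cases hsp : pvSp rest with
        | nil => exact absurd hsp (pvSp_ne_nil rest)
        | cons p ps => simp [pvSp, hsp]
      · have : PySem.Chars.splitOn.go ['.'] (f+1) (c :: rest) cur acc =
            PySem.Chars.splitOn.go ['.'] f rest (c :: cur) acc := by
          simp [PySem.Chars.splitOn.go, List.isPrefixOf, Ne.symm hc]
        rw [this, ih rest (c :: cur) acc (by simpa using Nat.lt_of_succ_lt_succ h)]
        cases hsp : pvSp rest with
        | nil => exact absurd hsp (pvSp_ne_nil rest)
        | cons p ps => simp [pvSp, hc, hsp, pvModHead]

lemma pvSplitOn_eq (l : List Char) : PySem.Chars.splitOn l ['.'] = pvSp l := by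
  unfold PySem.Chars.splitOn
  rw [pvGo_eq (l.length + 1) l [] [] (by omega)]
  cases hsp : pvSp l with
  | nil => exact absurd hsp (pvSp_ne_nil l)
  | cons p ps => simp

def pvCheck (p : List Char) : Bool := decide (p ≠ []) && p.all is_ident_char

-- A's loop abstracted over the not-yet-scanned tail; the flag is 'start == i'
-- (current build segment is empty)
def pvOkTail : List Char → Bool → Bool
  | [], empty => !empty
  | c :: t, empty =>
    if c = '.' then !empty && pvOkTail t true else is_ident_char c && pvOkTail t false

lemma pvOkTail_sp (t : List Char) :
    (pvOkTail t true = (pvSp t).all pvCheck) ∧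
    (pvOkTail t false = match pvSp t with
      | p :: ps => p.all is_ident_char && ps.all pvCheck
      | [] => true) := by
  induction t with
  | nil => simp [pvOkTail, pvSp, pvCheck]
  | cons c t ih =>
    by_cases hc : c = '.'
    · subst hc
      constructor
      · simp [pvOkTail, pvSp, pvCheck]
      · simp [pvOkTail, pvSp, ih.1]
    · cases hsp : pvSp t with
      | nil => exact absurd hsp (pvSp_ne_nil t)
      | cons q qs =>
        have h2 := ih.2
        rw [hsp] at h2
        constructor <;>
          simp [pvOkTail, pvSp, hc, hsp, pvModHead, pvCheck, h2, Bool.and_assoc]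

lemma pvLoop_eq (cs : List Char) : ∀ (n i start : Nat), cs.length - i = n → start ≤ i → i ≤ cs.length →
    parse_buildLoop cs i start =
      (if pvOkTail (cs.drop i) (start == i) then (String.ofList cs, "", true)
       else ("", "", false)) := by
  intro n
  induction n with
  | zero =>
    intro i start h h1 h2
    have hi : i = cs.length := by omega
    subst hi
    rw [parse_buildLoop]
    have hnl : ¬ cs.length < cs.length := by omega
    rw [dif_neg hnl, List.drop_length]
    by_cases hs : start = cs.length <;> simp [hs, pvOkTail, pysem, PySem.List.slice]
  | succ n ih =>
    intro i start h h1 h2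
    have hlt : i < cs.length := by omega
    rw [parse_buildLoop, dif_pos hlt, List.drop_eq_getElem_cons hlt]
    by_cases hdot : cs[i] = '.'
    · by_cases hsi : start = i
      · simp [hdot, hsi, pvOkTail]
      · have hrec := ih (i+1) (i+1) (by omega) (by omega) (by omega)
        simp [hdot, hsi, pvOkTail, hrec]
    · by_cases hic : is_ident_char cs[i]
      · have hrec := ih (i+1) start (by omega) (by omega) (by omega)
        have hne : (start == i + 1) = false := by simp; omega
        simp [hdot, hic, pvOkTail, hrec, hne]
      · simp [hdot, hic, pvOkTail]

-- ===== VERDICT (by name: the statement is the Claim_ definition above) =====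
theorem parse_build_spec : Claim_equal_parse_build := by
  intro v _
  unfold Spec_parse_build parse_build parse_build_alt
  by_cases hg : v = "" ∨ PySem.Str.pyGet? v 0 ≠ some '+'
  · rw [if_pos hg, if_pos hg]
  · rw [if_neg hg, if_neg hg]
    have hne : v ≠ "" := fun h => hg (Or.inl h)
    cases hv : v.toList with
    | nil =>
      exact absurd (by have := congrArg String.ofList hv; simpa using this) hne
    | cons c rest =>
      have hdrop : PySem.List.slice v.toList (some 1) none = rest := by
        simp [pysem, PySem.List.slice, hv]
      have hof : String.ofList v.toList = v := by simp
      have hloop := pvLoop_eq v.toList (v.toList.length - 1) 1 1 rfl (le_refl 1)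
        (by rw [hv]; simp)
      rw [hv] at hloop hdrop hof
      rw [hloop, hdrop, pvSplitOn_eq]
      simp only [List.drop_succ_cons, List.drop_zero]
      have hok := (pvOkTail_sp rest).1
      rw [show (fun p => decide (p ≠ []) && p.all is_ident_char) = pvCheck from rfl, ← hok]
      simp [hof]
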